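-- pv_equiv track=rewrite | github.com/hugoboss23-5/sunlight | code/improved_baseline.py | categorize_type
-- ===== SOURCE A (Python) =====
-- def categorize_type(description: str) -> str:
--     """Categorize contract by type"""
--     desc = description.lower() if description else ""
--
--     # Contract type keywords
--     if any(kw in desc for kw in ['aircraft', 'aviation', 'aerospace', 'flight']):
--         return "AEROSPACE"
--     elif any(kw in desc for kw in ['it ', 'software', 'computer', 'data', 'cyber']):
--         return "IT_SERVICES"
--     elif any(kw in desc for kw in ['maintenance', 'repair', 'support']):
--         return "MAINTENANCE"
--     elif any(kw in desc for kw in ['research', 'development', 'r&d', 'prototype']):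
--         return "RD"
--     elif any(kw in desc for kw in ['construction', 'building', 'facility']):
--         return "CONSTRUCTION"
--     else:
--         return "OTHER"
-- ===== SOURCE B (Python) =====
-- # Flat keyword->priority map; single pass computing the minimum matched
-- # priority (no early return, no per-category keyword grouping).
-- KEYWORD_PRIORITY = {
--     'aircraft': 0, 'aviation': 0, 'aerospace': 0, 'flight': 0,
--     'it ': 1, 'software': 1, 'computer': 1, 'data': 1, 'cyber': 1,
--     'maintenance': 2, 'repair': 2, 'support': 2,
--     'research': 3, 'development': 3, 'r&d': 3, 'prototype': 3,
--     'construction': 4, 'building': 4, 'facility': 4,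
-- }
-- CATEGORIES = ["AEROSPACE", "IT_SERVICES", "MAINTENANCE", "RD", "CONSTRUCTION"]
--
-- def categorize_type(description: str) -> str:
--     desc = description.lower() if description else ""
--     best = None
--     for kw, pri in KEYWORD_PRIORITY.items():
--         if kw in desc and (best is None or pri < best):
--             best = pri
--     return CATEGORIES[best] if best is not None else "OTHER"
-- ===== Notes on version B (the rewrite author's own statement) =====
-- stated objective: alternative
-- what changed: Replaced the short-circuiting if/elif chain of per-category any() tests with a single exhaustive pass over a flat keyword-to-priority map that accumulates the minimum matched priority, then indexes the category table (lowest matched priority = first matching branch).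
import Mathlib
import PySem

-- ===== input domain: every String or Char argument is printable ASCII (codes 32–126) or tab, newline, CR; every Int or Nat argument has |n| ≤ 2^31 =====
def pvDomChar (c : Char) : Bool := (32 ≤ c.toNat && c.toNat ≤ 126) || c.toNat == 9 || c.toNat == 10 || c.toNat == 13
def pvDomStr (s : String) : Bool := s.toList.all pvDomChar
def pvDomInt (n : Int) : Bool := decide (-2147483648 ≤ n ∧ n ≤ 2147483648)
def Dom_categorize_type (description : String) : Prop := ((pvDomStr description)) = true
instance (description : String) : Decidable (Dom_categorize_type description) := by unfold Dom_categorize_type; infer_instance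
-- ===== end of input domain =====

-- B replaces the short-circuiting if/elif chain by one exhaustive pass over a flat
-- keyword→priority map accumulating the minimum matched priority (alternative decomposition).

-- ===== PORT A =====
def categorize_type (description : String) : String :=
  let desc := if description = "" then "" else PySem.Str.lower description
  if (["aircraft", "aviation", "aerospace", "flight"].any (fun kw => PySem.Str.isIn kw desc)) then "AEROSPACE"
  else if (["it ", "software", "computer", "data", "cyber"].any (fun kw => PySem.Str.isIn kw desc)) then "IT_SERVICES"
  else if (["maintenance", "repair", "support"].any (fun kw => PySem.Str.isIn kw desc)) then "MAINTENANCE"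
  else if (["research", "development", "r&d", "prototype"].any (fun kw => PySem.Str.isIn kw desc)) then "RD"
  else if (["construction", "building", "facility"].any (fun kw => PySem.Str.isIn kw desc)) then "CONSTRUCTION"
  else "OTHER"

-- ===== PORT B =====
-- flat keyword→priority association list (Source B's KEYWORD_PRIORITY dict, insertion order)
def ctKeywords : List (String × Nat) :=
  [("aircraft", 0), ("aviation", 0), ("aerospace", 0), ("flight", 0),
   ("it ", 1), ("software", 1), ("computer", 1), ("data", 1), ("cyber", 1),
   ("maintenance", 2), ("repair", 2), ("support", 2),
   ("research", 3), ("development", 3), ("r&d", 3), ("prototype", 3),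
   ("construction", 4), ("building", 4), ("facility", 4)]

def ctCategories : List String :=
  ["AEROSPACE", "IT_SERVICES", "MAINTENANCE", "RD", "CONSTRUCTION"]

-- one loop-body step: update the running minimum priority on a keyword match
def ctStep (desc : String) (best : Option Nat) (kp : String × Nat) : Option Nat :=
  if PySem.Str.isIn kp.1 desc && (match best with | none => true | some b => decide (kp.2 < b))
  then some kp.2 else best

def categorize_type_alt (description : String) : String :=
  let desc := if description = "" then "" else PySem.Str.lower description
  match ctKeywords.foldl (ctStep desc) none with
  | none => "OTHER"
  | some i => ctCategories.getD i ""   -- CATEGORIES[best]; i < 5 always, so the index never raises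

-- ===== PRECONDITION & SPEC =====
def Spec_categorize_type (description : String) (out : String) : Prop := out = categorize_type_alt description
instance (description : String) (out : String) : Decidable (Spec_categorize_type description out) := by unfold Spec_categorize_type; infer_instance

-- ===== CLAIM (what is proved, stated in full; the proofs are below) =====
def Claim_equal_categorize_type : Prop := ∀ (description : String), Dom_categorize_type description → Spec_categorize_type description (categorize_type description)

-- ===== LEMMAS AND PROOFS =====

-- folding one constant-priority group behaves like one `any` test updating a min
theorem ctFold_group (desc : String) (kws : List String) (p : Nat) (acc : Option Nat) :
    List.foldl (ctStep desc) acc (kws.map (fun k => (k, p))) =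
      if kws.any (fun kw => PySem.Str.isIn kw desc) then
        (match acc with | none => some p | some b => some (min b p))
      else acc := by
  induction kws generalizing acc with
  | nil => simp
  | cons k ks ih =>
    simp only [List.map_cons, List.foldl_cons, List.any_cons, ih]
    cases acc with
    | none =>
      by_cases hk : PySem.Str.isIn k desc = true <;>
      by_cases ha : (ks.any fun kw => PySem.Str.isIn kw desc) = true <;>
        simp_all [ctStep]
    | some b =>
      by_cases hk : PySem.Str.isIn k desc = true <;>
      by_cases ha : (ks.any fun kw => PySem.Str.isIn kw desc) = true <;>
      by_cases hb : p < b <;>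
        simp_all [ctStep, Nat.min_def] <;> split_ifs <;> simp_all <;> omega

theorem ctKeywords_eq : ctKeywords =
    (["aircraft", "aviation", "aerospace", "flight"].map (fun k => (k, 0)))
    ++ (["it ", "software", "computer", "data", "cyber"].map (fun k => (k, 1)))
    ++ (["maintenance", "repair", "support"].map (fun k => (k, 2)))
    ++ (["research", "development", "r&d", "prototype"].map (fun k => (k, 3)))
    ++ (["construction", "building", "facility"].map (fun k => (k, 4))) := rfl

-- ===== VERDICT (by name: the statement is the Claim_ definition above) =====
theorem categorize_type_spec : Claim_equal_categorize_type := by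
  intro description _
  unfold Spec_categorize_type categorize_type categorize_type_alt
  rw [ctKeywords_eq]
  simp only [List.foldl_append, ctFold_group]
  set desc := if description = "" then "" else PySem.Str.lower description with hdesc
  by_cases h0 : (["aircraft", "aviation", "aerospace", "flight"].any (fun kw => PySem.Str.isIn kw desc)) <;>
  by_cases h1 : (["it ", "software", "computer", "data", "cyber"].any (fun kw => PySem.Str.isIn kw desc)) <;>
  by_cases h2 : (["maintenance", "repair", "support"].any (fun kw => PySem.Str.isIn kw desc)) <;>
  by_cases h3 : (["research", "development", "r&d", "prototype"].any (fun kw => PySem.Str.isIn kw desc)) <;>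
  by_cases h4 : (["construction", "building", "facility"].any (fun kw => PySem.Str.isIn kw desc)) <;>
    simp_all [ctCategories]
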